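-- pv_equiv track=rewrite | github.com/samirsonawane2067/Sign-Language-Detection | grammar_corrector.py | _reorder_time_expressions
-- ===== SOURCE A (Python) =====
-- def _reorder_time_expressions(text: str) -> str:
--     """Move time expressions to the end of the sentence."""
--     time_words = ['yesterday', 'today', 'tomorrow', 'morning', 'afternoon', 'evening',
--                   'night', 'monday', 'tuesday', 'wednesday', 'thursday', 'friday',
--                   'saturday', 'sunday', 'january', 'february', 'march', 'april',
--                   'may', 'june', 'july', 'august', 'september', 'october', 'november',
--                   'december', 'week', 'month', 'year', 'hour', 'minute', 'second']
--
--     words = text.split()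
--     time_expressions = []
--     other_words = []
--
--     for word in words:
--         if word.lower() in time_words:
--             time_expressions.append(word)
--         else:
--             other_words.append(word)
--
--     # Reconstruct: other words + time expressions
--     if time_expressions:
--         return ' '.join(other_words + time_expressions)
--     return text
-- ===== SOURCE B (Python) =====
-- def _reorder_time_expressions(text: str) -> str:
--     """Move time expressions to the end of the sentence."""
--     time_words = ['yesterday', 'today', 'tomorrow', 'morning', 'afternoon', 'evening',
--                   'night', 'monday', 'tuesday', 'wednesday', 'thursday', 'friday',
--                   'saturday', 'sunday', 'january', 'february', 'march', 'april',
--                   'may', 'june', 'july', 'august', 'september', 'october', 'november',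
--                   'december', 'week', 'month', 'year', 'hour', 'minute', 'second']
--
--     words = text.split()
--     if not any(w.lower() in time_words for w in words):
--         return text
--     # stable sort: non-time words (key False) keep their order first, time words follow in order
--     return ' '.join(sorted(words, key=lambda w: w.lower() in time_words))
-- ===== Notes on version B (the rewrite author's own statement) =====
-- stated objective: alternative
-- what changed: Replaces the two explicit accumulator lists with a single stable sort keyed on time-word membership (non-time words first, time words last), guarded by an any() check that returns the original text unchanged when no time word occurs.
import Mathlib
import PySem

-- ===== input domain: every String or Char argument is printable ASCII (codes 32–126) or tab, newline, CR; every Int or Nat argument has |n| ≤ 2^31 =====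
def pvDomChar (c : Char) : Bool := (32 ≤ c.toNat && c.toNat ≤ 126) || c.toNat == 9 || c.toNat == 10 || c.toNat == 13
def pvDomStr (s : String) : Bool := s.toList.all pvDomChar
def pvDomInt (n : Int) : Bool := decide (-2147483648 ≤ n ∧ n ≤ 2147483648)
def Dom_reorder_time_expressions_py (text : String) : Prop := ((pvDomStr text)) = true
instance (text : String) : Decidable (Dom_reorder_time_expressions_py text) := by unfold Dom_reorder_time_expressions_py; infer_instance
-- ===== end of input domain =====

-- B replaces A's two accumulator lists with a single stable sort on the boolean key
-- "is a time word" (alternative decomposition; same cost class, not claimed faster).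


-- the time_words list, shared data constant of both ports
def pvTimeWords : List String :=
  ["yesterday", "today", "tomorrow", "morning", "afternoon", "evening",
   "night", "monday", "tuesday", "wednesday", "thursday", "friday",
   "saturday", "sunday", "january", "february", "march", "april",
   "may", "june", "july", "august", "september", "october", "november",
   "december", "week", "month", "year", "hour", "minute", "second"]

-- ===== PORT A =====
-- one pass with two accumulators (time_expressions, other_words), then join or return text
def reorder_time_expressions_py (text : String) : String :=
  let words := PySem.Str.split₀ text
  let st := words.foldl
    (fun (st : List String × List String) word =>
      if pvTimeWords.contains (PySem.Str.lower word) then (st.1 ++ [word], st.2)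
      else (st.1, st.2 ++ [word]))
    ([], [])
  if st.1 ≠ [] then PySem.Str.join " " (st.2 ++ st.1) else text

-- ===== PORT B =====
-- stable sort on the boolean key, guarded by an any() check
def reorder_time_expressions_py_alt (text : String) : String :=
  let words := PySem.Str.split₀ text
  if words.any (fun w => pvTimeWords.contains (PySem.Str.lower w)) then
    PySem.Str.join " "
      (PySem.List.sorted words (fun w => pvTimeWords.contains (PySem.Str.lower w)))
  else text

-- ===== PRECONDITION & SPEC =====
def Spec_reorder_time_expressions_py (text : String) (out : String) : Prop := out = reorder_time_expressions_py_alt text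
instance (text : String) (out : String) : Decidable (Spec_reorder_time_expressions_py text out) := by unfold Spec_reorder_time_expressions_py; infer_instance

-- ===== CLAIM (what is proved, stated in full; the proofs are below) =====
def Claim_equal_reorder_time_expressions_py : Prop := ∀ (text : String), Dom_reorder_time_expressions_py text → Spec_reorder_time_expressions_py text (reorder_time_expressions_py text)

-- ===== LEMMAS AND PROOFS =====

-- A's fold accumulates the two filters of the word list
theorem pv_foldA (key : String → Bool) (words t o : List String) :
    words.foldl
      (fun (st : List String × List String) word =>
        if key word then (st.1 ++ [word], st.2) else (st.1, st.2 ++ [word]))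
      (t, o)
    = (t ++ words.filter key, o ++ words.filter (fun w => !key w)) := by
  induction words generalizing t o with
  | nil => simp
  | cons x xs ih =>
    by_cases h : key x <;> simp [h, ih]

theorem pv_insertBy_append_of_not {α : Type} (b : α → α → Bool) (x : α) (F T : List α)
    (h : ∀ y ∈ F, b x y = false) :
    PySem.List.insertBy b x (F ++ T) = F ++ PySem.List.insertBy b x T := by
  induction F with
  | nil => simp
  | cons f fs ih =>
    have hf : b x f = false := h f (by simp)
    simp [PySem.List.insertBy, hf, ih (fun y hy => h y (by simp [hy]))]

-- insertion sort on a boolean key is the stable partition: false-keyed first, then true-keyed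
theorem pv_sorted_bool (key : String → Bool) (xs : List String) :
    PySem.List.sorted xs key
      = xs.filter (fun w => !key w) ++ xs.filter key := by
  rw [PySem.List.sorted_eq_foldl_insertBy]
  induction xs using List.reverseRecOn with
  | nil => simp
  | append_singleton ys x ih =>
    rw [List.foldl_append, List.foldl_cons, List.foldl_nil, ih]
    by_cases hx : key x
    · -- key x = true: never before anything (¬ true < k), appended at the end
      rw [PySem.List.insertBy_of_forall_not_before]
      · simp [List.filter_append, hx]
      · intro y _; simp [hx]
    · -- key x = false: passes all false-keyed, inserted before the first true-keyed
      have hF : ∀ y ∈ ys.filter (fun w => !key w), decide (key x < key y) = false := by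
        intro y hy
        have := (List.mem_filter.mp hy).2
        simp at this
        simp [hx, this]
      rw [pv_insertBy_append_of_not _ _ _ _ hF]
      have hT : PySem.List.insertBy (fun a b => decide (key a < key b)) x (ys.filter key)
          = x :: ys.filter key := by
        cases hT : ys.filter key with
        | nil => simp [PySem.List.insertBy]
        | cons t ts =>
          have ht : key t = true := (List.mem_filter.mp (hT ▸ List.mem_cons_self)).2
          simp [PySem.List.insertBy, hx, ht]
      rw [hT]
      simp [List.filter_append, hx]

-- ===== VERDICT (by name: the statement is the Claim_ definition above) =====
theorem pv_main (key : String → Bool) (words : List String) (text : String) :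
    (if (words.foldl
          (fun (st : List String × List String) word =>
            if key word then (st.1 ++ [word], st.2) else (st.1, st.2 ++ [word]))
          ([], [])).1 ≠ [] then
       PySem.Str.join " "
         ((words.foldl
            (fun (st : List String × List String) word =>
              if key word then (st.1 ++ [word], st.2) else (st.1, st.2 ++ [word]))
            ([], [])).2 ++
          (words.foldl
            (fun (st : List String × List String) word =>
              if key word then (st.1 ++ [word], st.2) else (st.1, st.2 ++ [word]))
            ([], [])).1)
     else text)
    = (if words.any key then PySem.Str.join " " (PySem.List.sorted words key) else text) := by
  rw [pv_foldA key words [] [], pv_sorted_bool key words]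
  simp only [List.nil_append]
  by_cases h : words.any key
  · have hne : words.filter key ≠ [] := by
      rcases List.any_eq_true.mp h with ⟨x, hx, hk⟩
      exact List.ne_nil_of_mem (List.mem_filter.mpr ⟨hx, hk⟩)
    simp [h, hne]
  · have he : words.filter key = [] := by
      rw [List.filter_eq_nil_iff]
      intro x hx
      exact fun hk => h (List.any_eq_true.mpr ⟨x, hx, hk⟩)
    simp [h, he]

theorem reorder_time_expressions_py_spec : Claim_equal_reorder_time_expressions_py := by
  intro text _
  exact pv_main (fun w => pvTimeWords.contains (PySem.Str.lower w)) (PySem.Str.split₀ text) text
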